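-- pv_equiv track=rewrite | github.com/swanhong/matrix-fhe-lattigo | references/integer_dft.py | find_cyclotomic_polynomial_roots
-- ===== SOURCE A (Python) =====
-- def mod_pow(base: int, exp: int, mod: int) -> int:
--     """Compute (base^exp) % mod efficiently."""
--     result = 1
--     base = base % mod
--     while exp > 0:
--         if exp % 2 == 1:
--             result = (result * base) % mod
--         exp = exp >> 1
--         base = (base * base) % mod
--     return result
--
-- def find_cyclotomic_polynomial_roots(N: int, p: int) -> list:
--     """Find all roots of the cyclotomic polynomial X^N - X^{N/2} + 1 modulo p."""
--     roots = []
--     for x in range(p):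
--         # Check if x^N - x^{N/2} + 1 ≡ 0 (mod p)
--         x_N = mod_pow(x, N, p)
--         x_N_half = mod_pow(x, N // 2, p)
--         if (x_N - x_N_half + 1) % p == 0:
--             roots.append(x)
--     return roots
-- ===== SOURCE B (Python) =====
-- def find_cyclotomic_polynomial_roots(N: int, p: int) -> list:
--     """Find all roots of X^N - X^{N/2} + 1 mod p, exponent-major: binary-exponentiate
--     ALL residues at once as arrays (one pass over the exponent bits), then filter."""
--     def pow_all(e):
--         res = [1] * p
--         b = list(range(p))
--         while e > 0:
--             if e % 2 == 1:
--                 res = [r * s % p for r, s in zip(res, b)]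
--             b = [s * s % p for s in b]
--             e >>= 1
--         return res
--     xs_n = pow_all(N)
--     xs_half = pow_all(N // 2)
--     return [x for x, (t, h) in enumerate(zip(xs_n, xs_half)) if (t - h + 1) % p == 0]
-- ===== Notes on version B (the rewrite author's own statement) =====
-- stated objective: alternative
-- what changed: Exponent-major instead of residue-major: B binary-exponentiates all p residues simultaneously as whole arrays (one pass over the bits of the exponent, list comprehensions), then filters with enumerate/zip, instead of A's per-residue mod_pow calls inside a scan of range(p).
import Mathlib
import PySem

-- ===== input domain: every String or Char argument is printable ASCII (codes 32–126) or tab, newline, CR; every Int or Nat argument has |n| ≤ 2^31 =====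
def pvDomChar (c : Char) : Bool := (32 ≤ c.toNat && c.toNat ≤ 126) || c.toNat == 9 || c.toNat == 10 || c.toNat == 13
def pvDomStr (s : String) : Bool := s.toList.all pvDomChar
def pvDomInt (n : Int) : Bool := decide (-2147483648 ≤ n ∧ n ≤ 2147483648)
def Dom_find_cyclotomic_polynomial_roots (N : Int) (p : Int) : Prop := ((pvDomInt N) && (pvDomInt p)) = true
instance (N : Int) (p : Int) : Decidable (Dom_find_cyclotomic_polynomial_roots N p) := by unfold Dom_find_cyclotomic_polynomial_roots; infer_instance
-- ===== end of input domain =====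

-- B replaces A's residue-major scan (one mod_pow per x) by an exponent-major pass that
-- binary-exponentiates all residues at once as arrays; same O(p log N) cost, alternative structure.

-- termination measure for both while-loops (cited by name in decreasing_by)
theorem half_toNat_lt (e : Int) (h : 0 < e) : (e >>> (1 : Nat)).toNat < e.toNat := by
  rw [Int.shiftRight_eq_div_pow]; omega

-- ===== PORT A =====
-- the 'while exp > 0' loop of mod_pow; Python's 'exp >> 1' is Lean's '>>> (1:Nat)' (exact, exp > 0 here)
def modPowLoop (m result base e : Int) : Int :=
  if _h : 0 < e then
    modPowLoop m (if PySem.Int.mod e 2 = 1 then PySem.Int.mod (result * base) m else result)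
      (PySem.Int.mod (base * base) m) (e >>> (1 : Nat))
  else result
termination_by e.toNat
decreasing_by exact half_toNat_lt e _h

def mod_pow (base exp mod : Int) : Int :=
  modPowLoop mod 1 (PySem.Int.mod base mod) exp

def find_cyclotomic_polynomial_roots (N : Int) (p : Int) : List Int :=
  (PySem.List.pyRange 0 p 1).foldl (fun roots x =>
    let x_N := mod_pow x N p
    let x_N_half := mod_pow x (PySem.Int.floordiv N 2) p
    if PySem.Int.mod (x_N - x_N_half + 1) p = 0 then roots ++ [x] else roots) []

-- ===== PORT B =====
-- the 'while e > 0' loop of pow_all: both arrays as whole-list state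
def powAllLoop (p : Int) (res b : List Int) (e : Int) : List Int :=
  if _h : 0 < e then
    powAllLoop p
      (if PySem.Int.mod e 2 = 1 then List.zipWith (fun r s => PySem.Int.mod (r * s) p) res b else res)
      (b.map fun s => PySem.Int.mod (s * s) p) (e >>> (1 : Nat))
  else res
termination_by e.toNat
decreasing_by exact half_toNat_lt e _h

def pow_all (p e : Int) : List Int :=
  powAllLoop p (List.replicate p.toNat 1) (PySem.List.pyRange 0 p 1) e

def find_cyclotomic_polynomial_roots_alt (N : Int) (p : Int) : List Int :=
  (PySem.List.enumerate ((pow_all p N).zip (pow_all p (PySem.Int.floordiv N 2)))).filterMap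
    (fun q => if PySem.Int.mod (q.2.1 - q.2.2 + 1) p = 0 then some q.1 else none)

-- ===== PRECONDITION & SPEC =====
def Spec_find_cyclotomic_polynomial_roots (N : Int) (p : Int) (out : List Int) : Prop := out = find_cyclotomic_polynomial_roots_alt N p
instance (N : Int) (p : Int) (out : List Int) : Decidable (Spec_find_cyclotomic_polynomial_roots N p out) := by unfold Spec_find_cyclotomic_polynomial_roots; infer_instance

-- ===== CLAIM (what is proved, stated in full; the proofs are below) =====
def Claim_equal_find_cyclotomic_polynomial_roots : Prop := ∀ (N : Int) (p : Int), Dom_find_cyclotomic_polynomial_roots N p → Spec_find_cyclotomic_polynomial_roots N p (find_cyclotomic_polynomial_roots N p)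

-- ===== LEMMAS AND PROOFS =====

-- the vectorised loop, applied to two parallel images of one index list, is the
-- pointwise scalar loop
lemma powAllLoop_map (p : Int) (n : Nat) : ∀ (e : Int), e.toNat ≤ n →
    ∀ (l : List Int) (f g : Int → Int),
    powAllLoop p (l.map f) (l.map g) e = l.map (fun x => modPowLoop p (f x) (g x) e) := by
  induction n with
  | zero =>
    intro e he l f g
    have hne : ¬ 0 < e := by omega
    rw [powAllLoop]
    simp only [hne, dite_false]
    refine (List.map_congr_left ?_).symm
    intro x _
    rw [modPowLoop]
    simp [hne]
  | succ n ih =>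
    intro e he l f g
    by_cases hpos : 0 < e
    · have hlt : (e >>> (1 : Nat)).toNat ≤ n := by rw [Int.shiftRight_eq_div_pow]; omega
      rw [powAllLoop]
      simp only [hpos, dite_true]
      by_cases hbit : PySem.Int.mod e 2 = 1
      · simp only [hbit, if_true]
        rw [show List.zipWith (fun r s => PySem.Int.mod (r * s) p) (l.map f) (l.map g)
              = l.map (fun x => PySem.Int.mod (f x * g x) p) by
            simp [List.zipWith_map, List.zipWith_self]]
        rw [show (l.map g).map (fun s => PySem.Int.mod (s * s) p)
              = l.map (fun x => PySem.Int.mod (g x * g x) p) by simp [List.map_map]]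
        rw [ih _ hlt l _ _]
        refine List.map_congr_left ?_
        intro x _
        conv_rhs => rw [modPowLoop]
        rw [dif_pos hpos, if_pos hbit]
      · simp only [hbit, if_false]
        rw [show (l.map g).map (fun s => PySem.Int.mod (s * s) p)
              = l.map (fun x => PySem.Int.mod (g x * g x) p) by simp [List.map_map]]
        rw [ih _ hlt l _ _]
        refine List.map_congr_left ?_
        intro x _
        conv_rhs => rw [modPowLoop]
        rw [dif_pos hpos, if_neg hbit]
    · rw [powAllLoop]
      simp only [hpos, dite_false]
      refine (List.map_congr_left ?_).symm
      intro x _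
      rw [modPowLoop]
      simp [hpos]

lemma pow_all_eq_map (p e : Int) :
    pow_all p e = (PySem.List.pyRange 0 p 1).map (fun x => modPowLoop p 1 x e) := by
  have h := powAllLoop_map p e.toNat e le_rfl (PySem.List.pyRange 0 p 1) (fun _ => 1) id
  simp only [List.map_id, id] at h
  unfold pow_all
  rw [show List.replicate p.toNat (1 : Int)
        = (PySem.List.pyRange 0 p 1).map (fun _ => (1 : Int)) by
      rw [List.map_const', PySem.List.length_pyRange_one]; norm_num]
  exact h

lemma filterMap_if_eq_filter (c : Int → Prop) [DecidablePred c] (l : List Int) :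
    l.filterMap (fun x => if c x then some x else none) = l.filter (fun x => decide (c x)) := by
  induction l with
  | nil => rfl
  | cons a l ih =>
    by_cases h : c a <;> simp [h, ih]

theorem find_equiv (N p : Int) :
    find_cyclotomic_polynomial_roots N p = find_cyclotomic_polynomial_roots_alt N p := by
  by_cases hp : 0 < p
  · -- B side: a filter over the index range
    have hzip : (pow_all p N).zip (pow_all p (PySem.Int.floordiv N 2))
        = (PySem.List.pyRange 0 p 1).map
            (fun x => (modPowLoop p 1 x N, modPowLoop p 1 x (PySem.Int.floordiv N 2))) := by
      rw [pow_all_eq_map, pow_all_eq_map, List.zip_map']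
    have hB : find_cyclotomic_polynomial_roots_alt N p
        = (PySem.List.pyRange 0 p 1).filter
            (fun x => decide (PySem.Int.mod
              (modPowLoop p 1 x N - modPowLoop p 1 x (PySem.Int.floordiv N 2) + 1) p = 0)) := by
      unfold find_cyclotomic_polynomial_roots_alt
      rw [hzip, PySem.List.enumerate_eq_map_pyRange _ (0, 0)]
      have hlen : PySem.List.len ((PySem.List.pyRange 0 p 1).map
          (fun x => (modPowLoop p 1 x N, modPowLoop p 1 x (PySem.Int.floordiv N 2)))) = p := by
        simp [PySem.List.len, PySem.List.length_pyRange_one]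
        omega
      rw [hlen]
      rw [List.map_congr_left (fun j hj => by
        have hm := PySem.List.mem_pyRange_one.mp hj
        rw [PySem.List.pyGetD_map_pyRange_of_nonneg _ p j (0, 0) hm.1 hm.2])]
      rw [List.filterMap_map]
      exact filterMap_if_eq_filter _ _
    -- A side: the foldl is the same filter
    have hA : find_cyclotomic_polynomial_roots N p
        = (PySem.List.pyRange 0 p 1).filter
            (fun x => decide (PySem.Int.mod
              (mod_pow x N p - mod_pow x (PySem.Int.floordiv N 2) p + 1) p = 0)) := by
      unfold find_cyclotomic_polynomial_roots
      rw [show (fun (roots : List Int) (x : Int) =>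
            let x_N := mod_pow x N p
            let x_N_half := mod_pow x (PySem.Int.floordiv N 2) p
            if PySem.Int.mod (x_N - x_N_half + 1) p = 0 then roots ++ [x] else roots)
          = (fun roots x =>
            if (fun y => decide (PySem.Int.mod
                (mod_pow y N p - mod_pow y (PySem.Int.floordiv N 2) p + 1) p = 0)) x = true
            then roots ++ [id x] else roots) by
        funext roots x; simp]
      rw [PySem.List.foldl_append_if]
      simp
    rw [hA, hB]
    refine List.filter_congr ?_
    intro x hx
    have hm := PySem.List.mem_pyRange_one.mp hx
    have hmod : PySem.Int.mod x p = x := by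
      rw [PySem.Int.mod_eq_emod_of_pos (by omega : (0 : Int) < p)]
      exact Int.emod_eq_of_lt hm.1 hm.2
    simp [mod_pow, hmod]
  · -- p ≤ 0: both sides are []
    have hnil : PySem.List.pyRange 0 p 1 = [] := PySem.List.pyRange_one_eq_nil (by omega)
    have hrep : List.replicate p.toNat (1 : Int) = [] := by
      have : p.toNat = 0 := by omega
      rw [this]; rfl
    have hpa : ∀ e : Int, pow_all p e = [] := by
      intro e
      have h := powAllLoop_map p e.toNat e le_rfl [] id id
      simp only [List.map_nil] at h
      unfold pow_all
      rw [hnil, hrep]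
      exact h
    unfold find_cyclotomic_polynomial_roots find_cyclotomic_polynomial_roots_alt
    rw [hnil, hpa, hpa]
    simp

-- ===== VERDICT (by name: the statement is the Claim_ definition above) =====
theorem find_cyclotomic_polynomial_roots_spec : Claim_equal_find_cyclotomic_polynomial_roots := by
  intro N p _
  unfold Spec_find_cyclotomic_polynomial_roots
  exact find_equiv N p
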